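-- pv_equiv track=rewrite | github.com/3xp10it/sqlmap_my_tamper | mytemper.py | charencode
-- ===== SOURCE A (Python) =====
-- def charencode(payload, **kwargs):
--     """
--     Url-encodes all characters in a given payload (not processing already
--     encoded)
--     Tested against:
--         * Microsoft SQL Server 2005
--         * MySQL 4, 5.0 and 5.5
--         * Oracle 10g
--         * PostgreSQL 8.3, 8.4, 9.0
--     Notes:
--         * Useful to bypass very weak web application firewalls that do not
--           url-decode the request before processing it through their ruleset
--         * The web server will anyway pass the url-decoded version behind,
--           hence it should work against any DBMS
--
--     >>> tamper('SELECT FIELD FROM%20TABLE')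
--     '%53%45%4C%45%43%54%20%46%49%45%4C%44%20%46%52%4F%4D%20%54%41%42%4C%45'
--     """
--     retVal = payload
--     if payload:
--         retVal = ""
--         i = 0
--         while i < len(payload):
--             if payload[i] == '%' and (i < len(payload) - 2) and payload[i + 1:i + 2] in string.hexdigits and payload[i + 2:i + 3] in string.hexdigits:
--                 retVal += payload[i:i + 3]
--                 i += 3
--             else:
--                 retVal += '%%%.2X' % ord(payload[i])
--                 i += 1
--     return retVal
-- ===== SOURCE B (Python) =====
-- import re
--
-- _HEX_OR_CHAR = re.compile(r'%[0-9a-fA-F]{2}|.', re.DOTALL)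
--
--
-- def charencode(payload, **kwargs):
--     if not payload:
--         return payload
--     return _HEX_OR_CHAR.sub(
--         lambda m: m.group() if len(m.group()) == 3 else '%%%.2X' % ord(m.group()),
--         payload)
-- ===== Notes on version B (the rewrite author's own statement) =====
-- stated objective: idiomatic
-- what changed: Replaces the hand-written index/accumulator while-loop (manual slice tests for already-encoded hex triples, quadratic string appends) by a single compiled-regex substitution whose leftmost-first alternation (percent-hex-triple first, then any single character, DOTALL) does the skip-or-encode choice.
-- crash fix: On payloads where a percent sign is followed by at least two characters, A raises NameError (its module never imports the stdlib string module, whose hexdigits the skip test then evaluates); B returns the url-encoded payload with those already-encoded hex triples kept verbatim. — e.g. on charencode("%20"): A raises NameError, B returns "%20"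
import Mathlib
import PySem

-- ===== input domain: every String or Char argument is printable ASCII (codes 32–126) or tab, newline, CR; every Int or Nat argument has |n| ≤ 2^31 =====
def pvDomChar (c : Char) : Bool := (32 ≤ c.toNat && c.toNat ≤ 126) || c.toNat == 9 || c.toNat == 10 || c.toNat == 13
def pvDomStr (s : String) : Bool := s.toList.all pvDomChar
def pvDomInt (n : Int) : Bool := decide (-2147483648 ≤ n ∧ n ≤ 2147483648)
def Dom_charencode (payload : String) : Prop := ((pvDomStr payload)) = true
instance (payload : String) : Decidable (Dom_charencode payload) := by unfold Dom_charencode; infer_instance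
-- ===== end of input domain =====

-- B replaces A's hand-written index/skip while-loop by a single regex substitution
-- ('%[0-9a-fA-F]{2}|.' with DOTALL, hex-triple alternative first); same return value, more idiomatic.

-- ===== PORT A =====
-- string.hexdigits as a list of characters
def pvHexdigits : List Char := "0123456789abcdefABCDEF".toList

-- Python 's in string.hexdigits' for s a slice of length ≤ 1: '' is a substring of
-- anything (True), and a 1-char string is a substring iff the char occurs; exact here
-- because A only tests slices of length ≤ 1.
def pvInHexdigits (s : List Char) : Bool := s.all (fun c => pvHexdigits.contains c)

def pvHexDigitChar (n : Nat) : Char := "0123456789ABCDEF".toList.getD n ' '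

-- "'%%%.2X' % ord(c)": exact for c.toNat < 256 (all Dom_charencode chars)
def pvEnc (c : Char) : String := String.ofList ['%', pvHexDigitChar (c.toNat / 16), pvHexDigitChar (c.toNat % 16)]

-- A's while-loop: index i into the full payload, string accumulator retVal
def charencodeGo (pl : List Char) (i : Nat) (ret : String) : String :=
  if h : i < pl.length then
    if pl[i] == '%' && decide (i < pl.length - 2)
        && pvInHexdigits (PySem.List.slice pl (some ((i : Int) + 1)) (some ((i : Int) + 2)))
        && pvInHexdigits (PySem.List.slice pl (some ((i : Int) + 2)) (some ((i : Int) + 3))) then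
      charencodeGo pl (i + 3) (ret ++ String.ofList (PySem.List.slice pl (some (i : Int)) (some ((i : Int) + 3))))
    else
      charencodeGo pl (i + 1) (ret ++ pvEnc pl[i])
  else ret
termination_by pl.length - i

def charencode (payload : String) : String :=
  if payload = "" then payload else charencodeGo payload.toList 0 ""

-- ===== PORT B =====
-- the char class [0-9a-fA-F]
def pvIsHex (c : Char) : Bool := pvHexdigits.contains c

-- hand port of re.sub with pattern '%[0-9a-fA-F]{2}|.' (re.DOTALL): at each position the
-- leftmost-first rule tries the hex-triple alternative, else '.' consumes one char (DOTALL: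
-- any char); exact because the regex alternation is exactly this deterministic choice.
def charencodeAltGo : List Char → String
  | [] => ""
  | '%' :: a :: b :: rest =>
    if pvIsHex a && pvIsHex b then String.ofList ['%', a, b] ++ charencodeAltGo rest
    else pvEnc '%' ++ charencodeAltGo (a :: b :: rest)
  | c :: rest => pvEnc c ++ charencodeAltGo rest
termination_by l => l.length

def charencode_alt (payload : String) : String :=
  if payload = "" then payload else charencodeAltGo payload.toList

-- ===== PRECONDITION & SPEC =====
-- The given module of A never imports 'string', so A raises NameError the moment the
-- hex-skip test is evaluated, i.e. exactly when '%' occurs with at least two characters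
-- after it (short-circuit: string.hexdigits is only reached then); Pre_ excludes exactly
-- those raising inputs and nothing else.
def Pre_charencode (payload : String) : Prop := '%' ∉ payload.toList.take (payload.toList.length - 2)
instance (payload : String) : Decidable (Pre_charencode payload) := by unfold Pre_charencode; infer_instance
def pvWitness_charencode : String := "SELECT 1"

-- On inputs where '%' precedes two more characters A raises NameError ('string' is not
-- imported in its module); B returns the encoded payload with the hex triples kept.
def Raises_charencode (payload : String) : Prop := '%' ∈ payload.toList.take (payload.toList.length - 2)
instance (payload : String) : Decidable (Raises_charencode payload) := by unfold Raises_charencode; infer_instance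
def pvRaiseWitness_charencode : String := "%20"
def pvRaiseWitnessOut_charencode : String := "%20"

def Spec_charencode (payload : String) (out : String) : Prop := out = charencode_alt payload
instance (payload : String) (out : String) : Decidable (Spec_charencode payload out) := by unfold Spec_charencode; infer_instance

-- ===== CLAIM (what is proved, stated in full; the proofs are below) =====
def Claim_equal_charencode : Prop := ∀ (payload : String), Dom_charencode payload → Pre_charencode payload → Spec_charencode payload (charencode payload)
def Claim_raises_charencode : Prop := (∀ (payload : String), Dom_charencode payload → Raises_charencode payload → ¬ Pre_charencode payload) ∧ (Dom_charencode (pvRaiseWitness_charencode) ∧ Raises_charencode (pvRaiseWitness_charencode) ∧ charencode_alt (pvRaiseWitness_charencode) = pvRaiseWitnessOut_charencode)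

-- ===== LEMMAS AND PROOFS =====

lemma altGo_nil : charencodeAltGo [] = "" := by simp [charencodeAltGo]

lemma altGo_triple (a b : Char) (rest : List Char) (hx : (pvIsHex a && pvIsHex b) = true) :
    charencodeAltGo ('%' :: a :: b :: rest) = String.ofList ['%', a, b] ++ charencodeAltGo rest := by
  simp [charencodeAltGo, hx]

lemma altGo_pct_nohex (a b : Char) (rest : List Char) (hx : ¬ (pvIsHex a && pvIsHex b) = true) :
    charencodeAltGo ('%' :: a :: b :: rest) = pvEnc '%' ++ charencodeAltGo (a :: b :: rest) := by
  simp [charencodeAltGo, hx]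

lemma altGo_pct1 : charencodeAltGo ['%'] = pvEnc '%' ++ charencodeAltGo [] := by
  simp [charencodeAltGo]

lemma altGo_pct2 (a : Char) : charencodeAltGo ['%', a] = pvEnc '%' ++ charencodeAltGo [a] := by
  simp [charencodeAltGo]

lemma altGo_other (c : Char) (rest : List Char) (hc : c ≠ '%') :
    charencodeAltGo (c :: rest) = pvEnc c ++ charencodeAltGo rest := by
  rcases rest with _ | ⟨a, _ | ⟨b, r⟩⟩ <;> simp [charencodeAltGo, hc]

lemma pvInHexdigits_singleton (c : Char) : pvInHexdigits [c] = pvIsHex c := by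
  simp [pvInHexdigits, pvIsHex]

lemma slice_seg (pl : List Char) (a b : Nat) :
    PySem.List.slice pl (some ((a : Nat) : Int)) (some ((b : Nat) : Int)) = (pl.drop a).take (b - a) :=
  PySem.List.slice_natCast pl a b

lemma charencodeGo_eq (pl : List Char) :
    ∀ n i ret, pl.length - i = n →
      charencodeGo pl i ret = ret ++ charencodeAltGo (pl.drop i) := by
  intro n
  induction n using Nat.strong_induction_on with
  | _ n ih =>
    intro i ret hn
    rw [charencodeGo]
    by_cases h : i < pl.length
    · simp only [dif_pos h]
      rw [List.drop_eq_getElem_cons h]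
      by_cases hp : pl[i] = '%'
      · by_cases hlen : i < pl.length - 2
        · have h1 : i + 1 < pl.length := by omega
          have h2 : i + 2 < pl.length := by omega
          have d1 : pl.drop (i+1) = pl[i+1] :: pl.drop (i+2) := List.drop_eq_getElem_cons h1
          have d2 : pl.drop (i+2) = pl[i+2] :: pl.drop (i+3) := List.drop_eq_getElem_cons h2
          have s1 : PySem.List.slice pl (some ((i:Int)+1)) (some ((i:Int)+2)) = [pl[i+1]] := by
            have e := slice_seg pl (i+1) (i+2)
            push_cast at e
            rw [e, show i+1-i = 1 from by omega, d1]
            rfl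
          have s2 : PySem.List.slice pl (some ((i:Int)+2)) (some ((i:Int)+3)) = [pl[i+2]] := by
            have e := slice_seg pl (i+2) (i+3)
            push_cast at e
            rw [e, show i+1-i = 1 from by omega, d2]
            rfl
          have s3 : PySem.List.slice pl (some ((i:Int))) (some ((i:Int)+3)) = [pl[i], pl[i+1], pl[i+2]] := by
            have e := slice_seg pl i (i+3)
            push_cast at e
            rw [e, show i+3-i = 3 from by omega, List.drop_eq_getElem_cons h, d1, d2]
            rfl
          rw [s1, s2, s3]
          by_cases hx : (pvIsHex pl[i+1] && pvIsHex pl[i+2]) = true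
          · obtain ⟨hx1, hx2⟩ := Bool.and_eq_true_iff.mp hx
            rw [if_pos (by simp [hp, hlen, pvInHexdigits_singleton, hx1, hx2])]
            rw [ih (pl.length - (i+3)) (by omega) (i+3) _ rfl]
            rw [hp]
            conv_rhs => rw [d1, d2, altGo_triple _ _ _ hx]
            rw [String.append_assoc]
          · rw [if_neg (by
              intro hc
              simp only [pvInHexdigits_singleton, Bool.and_eq_true] at hc
              exact absurd (by simp [hc.1.2, hc.2]) hx)]
            rw [ih (pl.length - (i+1)) (by omega) (i+1) _ rfl]
            rw [hp]
            conv_rhs => rw [d1, d2, altGo_pct_nohex _ _ _ hx, ← d2, ← d1]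
            rw [String.append_assoc]
        · rw [if_neg (by simp [hlen])]
          rw [ih (pl.length - (i+1)) (by omega) (i+1) _ rfl]
          have hd : (pl.drop (i+1)).length ≤ 1 := by
            simp [List.length_drop]; omega
          rw [hp]
          rcases e : pl.drop (i+1) with _ | ⟨a, _ | ⟨b, r⟩⟩
          · rw [altGo_pct1, String.append_assoc]
          · rw [altGo_pct2, String.append_assoc]
          · rw [e] at hd; simp at hd
      · rw [if_neg (by simp [hp])]
        rw [ih (pl.length - (i+1)) (by omega) (i+1) _ rfl]
        rw [altGo_other _ _ hp, String.append_assoc]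
    · simp only [dif_neg h]
      rw [List.drop_eq_nil_iff.mpr (by omega), altGo_nil]
      simp

-- ===== VERDICT (by name: the statement is the Claim_ definition above) =====
theorem charencode_spec : Claim_equal_charencode := by
  intro payload _ _
  unfold Spec_charencode charencode charencode_alt
  by_cases h : payload = ""
  · simp [h]
  · simp only [if_neg h]
    simpa using charencodeGo_eq payload.toList payload.toList.length 0 "" rfl

theorem charencode_raises : Claim_raises_charencode := by
  unfold Claim_raises_charencode
  exact ⟨fun _ _ h hp => hp h, by decide, by decide, by simp [pvRaiseWitness_charencode, pvRaiseWitnessOut_charencode, charencode_alt, charencodeAltGo, pvIsHex, pvHexdigits, pvEnc]⟩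

-- self-check: the stated raise witness really lies inside Raises_charencode
theorem charencode_raises_witness_ok : Raises_charencode pvRaiseWitness_charencode := charencode_raises.2.2.1
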